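-- pv_equiv track=rewrite | github.com/imarshallwidjaja/data-etl-dagster | libs/spatial_utils/tabular_headers.py | remove_inner_vowels
-- ===== SOURCE A (Python) =====
-- from typing import Callable, Dict, List, Optional, Pattern, Set, Tuple
--
-- def remove_inner_vowels(text: str) -> str:
--     """
--     Shorten words by removing inner vowels while preserving readability.
--
--     For each word:
--     - If length <= 2: keep as-is
--     - Else: keep first char + remove vowels from middle + keep last char
--
--     Args:
--         text: Underscore-separated string (e.g., "revenue").
--
--     Returns:
--         String with inner vowels removed (e.g., "rvne").
--
--     Examples:
--         >>> remove_inner_vowels("revenue")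
--         'rvne'
--         >>> remove_inner_vowels("data")
--         'dta'
--         >>> remove_inner_vowels("id")
--         'id'
--     """
--     vowels = set("aeiou")
--     words = text.split("_")
--     result: List[str] = []
--     for word in words:
--         if len(word) <= 2:
--             result.append(word)
--         else:
--             # Keep first char, remove vowels from middle, keep last char
--             middle = word[1:-1]
--             compressed_middle = "".join(c for c in middle if c not in vowels)
--             result.append(word[0] + compressed_middle + word[-1])
--     return "_".join(result)
-- ===== SOURCE B (Python) =====
-- def remove_inner_vowels(text: str) -> str:
--     """Single pass: drop a vowel iff both neighbours exist and neither is '_'.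
--
--     A word-first or word-last char lacks an eligible neighbour on one side
--     (string boundary or '_'), so it is kept; words of length <= 2 have no
--     inner chars at all.  No tokenisation, one scan over the string.
--     """
--     out = []
--     n = len(text)
--     for i, c in enumerate(text):
--         if c in "aeiou" and 0 < i and text[i - 1] != "_" and i + 1 < n and text[i + 1] != "_":
--             continue
--         out.append(c)
--     return "".join(out)
-- ===== Notes on version B (the rewrite author's own statement) =====
-- stated objective: alternative
-- what changed: Replaced split-on-underscore / per-word middle-slice / re-join with a single positional scan that drops a vowel exactly when both neighbouring characters exist and are not underscores.
import Mathlib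
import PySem

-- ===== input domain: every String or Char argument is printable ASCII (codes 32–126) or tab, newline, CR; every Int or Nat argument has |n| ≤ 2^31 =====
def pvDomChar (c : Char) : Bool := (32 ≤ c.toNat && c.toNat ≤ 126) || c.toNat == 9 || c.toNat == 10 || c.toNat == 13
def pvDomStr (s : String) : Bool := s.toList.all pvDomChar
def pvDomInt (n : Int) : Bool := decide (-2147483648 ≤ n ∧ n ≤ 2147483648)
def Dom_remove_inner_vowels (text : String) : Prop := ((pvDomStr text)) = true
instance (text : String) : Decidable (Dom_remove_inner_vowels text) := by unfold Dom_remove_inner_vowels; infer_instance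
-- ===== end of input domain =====

-- B replaces A's split-on-'_' / per-word middle transform / rejoin with a single positional scan that drops a vowel iff both neighbours exist and are not '_' (objective: alternative).

-- ===== PORT A =====
def remove_inner_vowels (text : String) : String :=
  let vowels : PySem.Set Char := PySem.Set.ofList "aeiou".toList
  let words := PySem.Chars.splitOn text.toList ['_']
  let result : List (List Char) := words.foldl (fun acc word =>
    if word.length ≤ 2 then acc ++ [word]
    else
      let middle := PySem.Chars.slice word (some 1) (some (-1))
      -- "".join(c for c in middle if c not in vowels) over single chars = filter (exact)
      let compressed := middle.filter (fun c => !(PySem.Set.contains vowels c))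
      -- word[0] / word[-1]: len > 2 here, so the pyGetD default is unreachable
      acc ++ [[PySem.List.pyGetD word 0 ' '] ++ compressed ++ [PySem.List.pyGetD word (-1) ' ']]) []
  String.ofList (PySem.Chars.join ['_'] result)

-- ===== PORT B =====
def remove_inner_vowels_alt (text : String) : String :=
  let cs := text.toList
  let n : Int := cs.length
  let out : List Char := (PySem.List.enumerate cs 0).foldl (fun acc ic =>
    -- text[i-1] / text[i+1]: the short-circuit bound guards make the pyGetD default unreachable
    if "aeiou".toList.contains ic.2 && decide (0 < ic.1)
        && (PySem.List.pyGetD cs (ic.1 - 1) ' ' != '_')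
        && decide (ic.1 + 1 < n)
        && (PySem.List.pyGetD cs (ic.1 + 1) ' ' != '_')
    then acc
    else acc ++ [ic.2]) []
  String.ofList out

-- ===== PRECONDITION & SPEC =====
def Spec_remove_inner_vowels (text : String) (out : String) : Prop := out = remove_inner_vowels_alt text
instance (text : String) (out : String) : Decidable (Spec_remove_inner_vowels text out) := by unfold Spec_remove_inner_vowels; infer_instance

-- ===== CLAIM (what is proved, stated in full; the proofs are below) =====
def Claim_equal_remove_inner_vowels : Prop := ∀ (text : String), Dom_remove_inner_vowels text → Spec_remove_inner_vowels text (remove_inner_vowels text)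

-- ===== LEMMAS AND PROOFS =====

-- is a lowercase vowel
def pvV (c : Char) : Bool := "aeiou".toList.contains c

-- next-char eligibility: the remaining list is nonempty and its head is not '_'
def pvN : List Char → Bool
  | [] => false
  | c :: _ => c != '_'

-- B's scan with the prev-char context reduced to a Bool (previous char exists and is not '_')
def pvB (b : Bool) : List Char → List Char
  | [] => []
  | c :: rest => (if pvV c && b && pvN rest then [] else [c]) ++ pvB (c != '_') rest

-- specification of str.split('_')
def pvS : List Char → List (List Char)
  | [] => [[]]
  | c :: r => if c = '_' then [] :: pvS r else (c :: (pvS r).headI) :: (pvS r).tail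

-- A's per-word transform (the body of A's fold)
def pvG (word : List Char) : List Char :=
  if word.length ≤ 2 then word
  else [PySem.List.pyGetD word 0 ' ']
    ++ (PySem.Chars.slice word (some 1) (some (-1))).filter
         (fun c => !(PySem.Set.contains (PySem.Set.ofList "aeiou".toList) c))
    ++ [PySem.List.pyGetD word (-1) ' ']

-- prev-char context produced by a processed prefix
def pvP (pre : List Char) : Bool := match pre.getLast? with | none => false | some p => p != '_'

theorem pvS_ne_nil (cs : List Char) : pvS cs ≠ [] := by
  cases cs with
  | nil => simp [pvS]
  | cons c r => simp only [pvS]; split <;> simp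

theorem pvS_no_us (cs : List Char) (h : '_' ∉ cs) : pvS cs = [cs] := by
  induction cs with
  | nil => rfl
  | cons c r ih =>
    simp only [List.mem_cons, not_or] at h
    simp [pvS, Ne.symm h.1, ih h.2]

theorem pvS_split (w r : List Char) (h : '_' ∉ w) : pvS (w ++ '_' :: r) = w :: pvS r := by
  induction w with
  | nil => simp [pvS]
  | cons c w' ih =>
    simp only [List.mem_cons, not_or] at h
    simp [pvS, Ne.symm h.1, ih h.2]

theorem pv_decomp (cs : List Char) (h : '_' ∈ cs) :
    ∃ w r, cs = w ++ '_' :: r ∧ '_' ∉ w := by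
  induction cs with
  | nil => simp at h
  | cons c t ih =>
    by_cases hc : c = '_'
    · exact ⟨[], t, by simp [hc], by simp⟩
    · obtain ⟨w, r, rfl, hw⟩ := ih (by simpa [Ne.symm hc] using h)
      exact ⟨c :: w, r, rfl, by simp [Ne.symm hc, hw]⟩

theorem pv_inner (m : List Char) (z : Char) (t : List Char)
    (hm : '_' ∉ m) (hz : z ≠ '_') (ht : pvN t = false) :
    pvB true (m ++ z :: t) = m.filter (fun c => !pvV c) ++ z :: pvB true t := by
  induction m with
  | nil =>
    have hzt : (z != '_') = true := by simp [hz]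
    simp [pvB, ht, hzt]
  | cons a m' ih =>
    simp only [List.mem_cons, not_or] at hm
    have hnext : pvN (m' ++ z :: t) = true := by
      cases m' with
      | nil => simp [pvN, hz]
      | cons b m'' =>
        have : b ≠ '_' := fun hb => hm.2 (by simp [hb])
        simp [pvN, this]
    simp only [List.cons_append, pvB, hnext, Bool.and_true, List.filter_cons]
    have ha : (a != '_') = true := by simp [Ne.symm hm.1]
    rw [ha, ih hm.2]
    by_cases hv : pvV a = true
    · simp [hv]
    · simp [Bool.not_eq_true] at hv; simp [hv]

theorem pv_setmem (c : Char) :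
    PySem.Set.contains (PySem.Set.ofList "aeiou".toList) c = pvV c := by
  simp [pvV, PySem.Set.contains, List.contains_eq_mem, PySem.Set.mem_ofList]

theorem pv_slice_mid (c z : Char) (m : List Char) :
    PySem.Chars.slice (c :: m ++ [z]) (some 1) (some (-1)) = m := by
  simp [PySem.Chars.slice_eq_listSlice, PySem.List.slice, PySem.List.clampIdx]
  rw [if_neg (by omega)]
  simp

theorem pv_getD0 (c z : Char) (m : List Char) :
    PySem.List.pyGetD (c :: m ++ [z]) 0 ' ' = c := by
  rw [PySem.List.pyGetD_eq_getElem _ _ (by omega) (by simp; omega)]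
  simp

theorem pv_getDlast (c z : Char) (m : List Char) :
    PySem.List.pyGetD (c :: m ++ [z]) (-1) ' ' = z := by
  simp [PySem.List.pyGetD, PySem.List.pyGet?, PySem.List.pyIdx?]

theorem pvG_long (c : Char) (m : List Char) (z : Char) :
    pvG (c :: m ++ [z]) = c :: m.filter (fun x => !pvV x) ++ [z] := by
  by_cases h : m = []
  · subst h; simp [pvG]
  · have hlen : ¬ (c :: m ++ [z]).length ≤ 2 := by
      simp only [List.length_append, List.length_cons]
      have := List.length_pos_iff.mpr h
      omega
    simp only [pvG, hlen, if_false, pv_slice_mid, pv_getD0, pv_getDlast, pv_setmem]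
    simp

theorem pvB_us (b : Bool) (r : List Char) : pvB b ('_' :: r) = '_' :: pvB false r := by
  have h : pvV '_' = false := by decide
  simp [pvB, h]

theorem pv_W0 (w : List Char) (h : '_' ∉ w) : pvB false w = pvG w := by
  cases w with
  | nil => rfl
  | cons c rest =>
    simp only [List.mem_cons, not_or] at h
    rcases rest.eq_nil_or_concat with hrest | ⟨m, z, hrest⟩ <;> [skip; (rw [List.concat_eq_append] at hrest; subst hrest)]
    · subst hrest; simp [pvB, pvG]
    · have hm : '_' ∉ m := fun hx => h.2 (List.mem_append.mpr (Or.inl hx))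
      have hz : z ≠ '_' := by rintro rfl; exact h.2 (by simp)
      have hc : (c != '_') = true := by simp [Ne.symm h.1]
      rw [show pvB false (c :: (m ++ [z])) = [c] ++ pvB (c != '_') (m ++ [z]) from by
            simp [pvB]]
      rw [hc, show (m ++ [z] : List Char) = m ++ z :: [] from by simp,
        pv_inner m z [] hm hz rfl, ← List.cons_append, pvG_long]
      simp [pvB]

theorem pv_WS (w r : List Char) (h : '_' ∉ w) :
    pvB false (w ++ '_' :: r) = pvG w ++ '_' :: pvB false r := by
  cases w with
  | nil => simpa [pvG] using pvB_us false r
  | cons c rest =>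
    simp only [List.mem_cons, not_or] at h
    have hc : (c != '_') = true := by simp [Ne.symm h.1]
    rcases rest.eq_nil_or_concat with hrest | ⟨m, z, hrest⟩ <;> [skip; (rw [List.concat_eq_append] at hrest; subst hrest)]
    · subst hrest
      simp [pvB, pvG, pvN, show pvV '_' = false from by decide]
    · have hm : '_' ∉ m := fun hx => h.2 (List.mem_append.mpr (Or.inl hx))
      have hz : z ≠ '_' := by rintro rfl; exact h.2 (by simp)
      have e1 : (c :: (m ++ [z])) ++ '_' :: r = c :: (m ++ z :: ('_' :: r)) := by simp
      rw [e1, show pvB false (c :: (m ++ z :: ('_' :: r)))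
            = [c] ++ pvB (c != '_') (m ++ z :: ('_' :: r)) from by simp [pvB]]
      rw [hc, pv_inner m z ('_' :: r) hm hz rfl, pvB_us, ← List.cons_append, pvG_long]
      simp

theorem pv_main (cs : List Char) :
    pvB false cs = PySem.Chars.join ['_'] ((pvS cs).map pvG) := by
  by_cases h : '_' ∈ cs
  · obtain ⟨w, r, hcs, hw⟩ := pv_decomp cs h
    subst hcs
    rw [pvS_split _ _ hw, pv_WS _ _ hw, pv_main r]
    obtain ⟨q, t, hq⟩ : ∃ q t, pvS r = q :: t := by
      cases hqt : pvS r with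
      | nil => exact absurd hqt (pvS_ne_nil r)
      | cons q t => exact ⟨q, t, rfl⟩
    rw [hq]
    simp [PySem.Chars.join_cons_cons]
  · rw [pvS_no_us cs h]
    simp [PySem.Chars.join_singleton, pv_W0 cs h]
termination_by cs.length
decreasing_by subst hcs; simp; omega

theorem pv_go (fuel : Nat) (l cur : List Char) (acc : List (List Char)) (h : l.length ≤ fuel) :
    PySem.Chars.splitOn.go ['_'] fuel l cur acc
      = acc.reverse ++ ((cur.reverse ++ (pvS l).headI) :: (pvS l).tail) := by
  induction fuel generalizing l cur acc with
  | zero =>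
    have : l = [] := List.length_eq_zero_iff.mp (Nat.le_zero.mp h)
    subst this
    simp [PySem.Chars.splitOn.go, pvS]
  | succ fuel ih =>
    cases l with
    | nil => simp [PySem.Chars.splitOn.go, pvS]
    | cons c rest =>
      obtain ⟨q, t, hq⟩ : ∃ q t, pvS rest = q :: t := by
        cases hqt : pvS rest with
        | nil => exact absurd hqt (pvS_ne_nil rest)
        | cons q t => exact ⟨q, t, rfl⟩
      by_cases hc : c = '_'
      · subst hc
        have hpre : List.isPrefixOf ['_'] ('_' :: rest) = true := by simp [List.isPrefixOf]
        rw [PySem.Chars.splitOn.go]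
        simp only [hpre, if_true]
        rw [show List.drop ['_'].length ('_' :: rest) = rest from rfl,
          ih rest [] (cur.reverse :: acc) (by simp at h; omega)]
        simp [pvS, hq]
      · have hpre : List.isPrefixOf ['_'] (c :: rest) = false := by
          simp [List.isPrefixOf]; exact fun hh => absurd hh.symm hc
        rw [PySem.Chars.splitOn.go]
        simp only [hpre, Bool.false_eq_true, if_false]
        rw [ih rest (c :: cur) acc (by simp at h; omega)]
        simp [pvS, hc, hq]

theorem pv_splitOn (cs : List Char) : PySem.Chars.splitOn cs ['_'] = pvS cs := by
  obtain ⟨q, t, hq⟩ : ∃ q t, pvS cs = q :: t := by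
    cases hqt : pvS cs with
    | nil => exact absurd hqt (pvS_ne_nil cs)
    | cons q t => exact ⟨q, t, rfl⟩
  rw [PySem.Chars.splitOn, pv_go _ _ _ _ (by omega)]
  simp [hq]

theorem pv_regroup (V d1 g1 d2 g2 P N : Bool) (h1 : (d1 && g1) = P) (h2 : (d2 && g2) = N) :
    (V && d1 && g1 && d2 && g2) = (V && P && N) := by
  subst h1 h2
  cases V <;> cases d1 <;> cases g1 <;> cases d2 <;> cases g2 <;> rfl

theorem pv_step (pre : List Char) (c : Char) (rest : List Char) (acc : List Char) :
    (if "aeiou".toList.contains c && decide (0 < (pre.length : Int))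
        && (PySem.List.pyGetD (pre ++ c :: rest) ((pre.length : Int) - 1) ' ' != '_')
        && decide ((pre.length : Int) + 1 < ((pre ++ c :: rest).length : Int))
        && (PySem.List.pyGetD (pre ++ c :: rest) ((pre.length : Int) + 1) ' ' != '_')
      then acc else acc ++ [c])
    = acc ++ (if pvV c && pvP pre && pvN rest then [] else [c]) := by
  have hmid : (decide (0 < (pre.length : Int))
      && (PySem.List.pyGetD (pre ++ c :: rest) ((pre.length : Int) - 1) ' ' != '_')) = pvP pre := by
    rcases pre.eq_nil_or_concat with rfl | ⟨q, p, hq⟩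
    · simp [pvP]
    · rw [List.concat_eq_append] at hq; subst hq
      have hlen : (((q ++ [p]).length : Int)) - 1 = (q.length : Int) := by simp
      have hg : PySem.List.pyGetD ((q ++ [p]) ++ c :: rest) ((q.length : Int)) ' ' = p := by
        rw [PySem.List.pyGetD_eq_getElem _ _ (by omega) (by simp; omega)]
        simp
      rw [hlen, hg]
      simp [pvP]
  have hnext : (decide ((pre.length : Int) + 1 < ((pre ++ c :: rest).length : Int))
      && (PySem.List.pyGetD (pre ++ c :: rest) ((pre.length : Int) + 1) ' ' != '_')) = pvN rest := by
    cases rest with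
    | nil => simp [pvN]
    | cons h t =>
      have hg : PySem.List.pyGetD (pre ++ c :: h :: t) ((pre.length : Int) + 1) ' ' = h := by
        rw [PySem.List.pyGetD_eq_getElem _ _ (by omega) (by simp)]
        simp only [show ((pre.length : Int) + 1).toNat = pre.length + 1 from by omega]
        rw [List.getElem_append_right (by omega)]
        simp
      rw [hg]
      simp [pvN]
  rw [pv_regroup _ _ _ _ _ _ _ hmid hnext]
  simp only [pvV]
  split <;> rename_i hb <;> simp [*]

theorem pv_bridge (suf : List Char) : ∀ (pre acc : List Char),
    (PySem.List.enumerate suf (pre.length : Int)).foldl (fun acc ic =>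
      if "aeiou".toList.contains ic.2 && decide (0 < ic.1)
          && (PySem.List.pyGetD (pre ++ suf) (ic.1 - 1) ' ' != '_')
          && decide (ic.1 + 1 < ((pre ++ suf).length : Int))
          && (PySem.List.pyGetD (pre ++ suf) (ic.1 + 1) ' ' != '_')
      then acc else acc ++ [ic.2]) acc
    = acc ++ pvB (pvP pre) suf := by
  induction suf with
  | nil => intro pre acc; simp [pvB]
  | cons c rest ih =>
    intro pre acc
    rw [PySem.List.enumerate_cons, List.foldl_cons]
    rw [pv_step pre c rest acc]
    rw [show pre ++ c :: rest = (pre ++ [c]) ++ rest from by simp,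
      show ((pre.length : Int) + 1) = (((pre ++ [c]).length : Int)) from by simp]
    rw [ih (pre ++ [c])]
    have hP : pvP (pre ++ [c]) = (c != '_') := by simp [pvP]
    rw [hP]
    simp [pvB]

-- ===== VERDICT (by name: the statement is the Claim_ definition above) =====
theorem remove_inner_vowels_spec : Claim_equal_remove_inner_vowels := by
  intro text _
  show remove_inner_vowels text = remove_inner_vowels_alt text
  simp only [remove_inner_vowels, remove_inner_vowels_alt]
  apply congrArg String.ofList
  have hb := pv_bridge text.toList [] []
  simp only [List.nil_append, List.length_nil, Nat.cast_zero] at hb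
  refine Eq.trans ?_ hb.symm
  have hbody : (fun (acc : List (List Char)) word =>
      if word.length ≤ 2 then acc ++ [word]
      else acc ++ [[PySem.List.pyGetD word 0 ' ']
        ++ (PySem.Chars.slice word (some 1) (some (-1))).filter
             (fun c => !(PySem.Set.contains (PySem.Set.ofList "aeiou".toList) c))
        ++ [PySem.List.pyGetD word (-1) ' ']])
      = fun acc word => acc ++ [pvG word] := by
    funext acc word
    by_cases h : word.length ≤ 2 <;> simp [pvG, h]
  rw [hbody, PySem.List.foldl_append_singleton_eq_map, pv_splitOn]
  show PySem.Chars.join ['_'] ([] ++ (pvS text.toList).map pvG) = pvB (pvP []) text.toList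
  rw [List.nil_append, show pvP [] = false from rfl]
  exact (pv_main text.toList).symm
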